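-- pv_equiv track=rewrite | github.com/MontelioneLab/CSP_UBQ | scripts/domain_full_length_bifurcation.py | _tally_enriched
-- ===== SOURCE A (Python) =====
-- from typing import Any, Callable, Dict, List, Optional, Tuple
--
-- def _tally_enriched(rows: List[Dict[str, Any]]) -> Tuple[Dict[str, int], int]:
--     """Return (count dict, domains+full_length classified)."""
--     unresolved = domains = ful = 0
--     for r in rows:
--         if r.get("error_reason"):
--             unresolved += 1
--         elif (r.get("bifurcation_label") or "") == "domain":
--             domains += 1
--         elif (r.get("bifurcation_label") or "") == "full_length":
--             ful += 1
--         else: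
--             unresolved += 1
--     return {"rows": len(rows), "domains": domains, "full_length": ful, "unresolved": unresolved}, domains + ful
-- ===== SOURCE B (Python) =====
-- def _tally_enriched(rows):
--     """Return (count dict, domains+full_length classified)."""
--     domains = sum(1 for r in rows
--                   if not r.get("error_reason") and (r.get("bifurcation_label") or "") == "domain")
--     ful = sum(1 for r in rows
--               if not r.get("error_reason") and (r.get("bifurcation_label") or "") == "full_length")
--     unresolved = len(rows) - domains - ful
--     return {"rows": len(rows), "domains": domains, "full_length": ful, "unresolved": unresolved}, domains + ful
-- ===== Notes on version B (the rewrite author's own statement) =====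
-- stated objective: alternative
-- what changed: Replaces the single mutually-exclusive branching loop by two independent counting passes (one per label) and derives the unresolved count arithmetically as len(rows) - domains - full_length instead of counting it.
import Mathlib
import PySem

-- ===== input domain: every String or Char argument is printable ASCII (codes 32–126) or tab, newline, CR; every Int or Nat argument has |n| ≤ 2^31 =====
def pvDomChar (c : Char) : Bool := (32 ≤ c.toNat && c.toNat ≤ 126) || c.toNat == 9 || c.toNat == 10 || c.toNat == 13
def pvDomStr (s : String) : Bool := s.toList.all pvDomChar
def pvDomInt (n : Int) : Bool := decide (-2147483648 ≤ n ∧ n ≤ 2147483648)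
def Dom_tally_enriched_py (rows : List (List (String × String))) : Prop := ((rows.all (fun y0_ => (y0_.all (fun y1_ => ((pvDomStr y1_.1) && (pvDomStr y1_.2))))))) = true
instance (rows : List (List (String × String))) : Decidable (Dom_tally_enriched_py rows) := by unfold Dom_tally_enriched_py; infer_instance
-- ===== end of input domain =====

-- B replaces A's single branching loop by two independent counting passes plus an
-- arithmetic derivation of the unresolved count (alternative decomposition, same cost).

-- ===== PORT A =====
-- r.get(k): first match in the association list (shared transliteration of dict.get)
def pvGetRow (r : List (String × String)) (k : String) : Option String :=
  (r.find? (fun p => p.1 == k)).map (·.2)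

-- truthiness of r.get("error_reason"): non-None and non-empty string
def pvErrTruthy (r : List (String × String)) : Bool :=
  match pvGetRow r "error_reason" with
  | some s => !(s == "")
  | none => false

-- (r.get("bifurcation_label") or "")
def pvLabel (r : List (String × String)) : String :=
  (pvGetRow r "bifurcation_label").getD ""

-- the loop body of A (one row; state = (unresolved, domains, ful))
def pvStepA (st : Int × Int × Int) (r : List (String × String)) : Int × Int × Int :=
  if pvErrTruthy r then (st.1 + 1, st.2.1, st.2.2)
  else if pvLabel r == "domain" then (st.1, st.2.1 + 1, st.2.2)
  else if pvLabel r == "full_length" then (st.1, st.2.1, st.2.2 + 1)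
  else (st.1 + 1, st.2.1, st.2.2)

def tally_enriched_py (rows : List (List (String × String))) : (List (String × Int)) × Int :=
  let s := rows.foldl pvStepA (0, 0, 0)
  ([("rows", (rows.length : Int)), ("domains", s.2.1), ("full_length", s.2.2),
    ("unresolved", s.1)], s.2.1 + s.2.2)

-- ===== PORT B =====
def tally_enriched_py_alt (rows : List (List (String × String))) : (List (String × Int)) × Int :=
  let domains : Int := (rows.countP (fun r => !pvErrTruthy r && pvLabel r == "domain") : Int)
  let ful : Int := (rows.countP (fun r => !pvErrTruthy r && pvLabel r == "full_length") : Int)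
  let unresolved : Int := (rows.length : Int) - domains - ful
  ([("rows", (rows.length : Int)), ("domains", domains), ("full_length", ful),
    ("unresolved", unresolved)], domains + ful)

-- ===== PRECONDITION & SPEC =====
def Spec_tally_enriched_py (rows : List (List (String × String))) (out : (List (String × Int)) × Int) : Prop := out = tally_enriched_py_alt rows
instance (rows : List (List (String × String))) (out : (List (String × Int)) × Int) : Decidable (Spec_tally_enriched_py rows out) := by unfold Spec_tally_enriched_py; infer_instance

-- ===== CLAIM (what is proved, stated in full; the proofs are below) =====
def Claim_equal_tally_enriched_py : Prop := ∀ (rows : List (List (String × String))), Dom_tally_enriched_py rows → Spec_tally_enriched_py rows (tally_enriched_py rows)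

-- ===== LEMMAS AND PROOFS =====
theorem pv_loop (rows : List (List (String × String))) (u d f : Int) :
    rows.foldl pvStepA (u, d, f)
    = (u + ((rows.length : Int)
            - (rows.countP (fun r => !pvErrTruthy r && pvLabel r == "domain") : Int)
            - (rows.countP (fun r => !pvErrTruthy r && pvLabel r == "full_length") : Int)),
       d + (rows.countP (fun r => !pvErrTruthy r && pvLabel r == "domain") : Int),
       f + (rows.countP (fun r => !pvErrTruthy r && pvLabel r == "full_length") : Int)) := by
  induction rows generalizing u d f with
  | nil => simp
  | cons h t ih =>
    rw [List.foldl_cons]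
    by_cases he : pvErrTruthy h
    · rw [show pvStepA (u, d, f) h = (u + 1, d, f) from by simp [pvStepA, he]]
      rw [ih]
      simp [he, Prod.mk.injEq]
      omega
    · by_cases hd : pvLabel h == "domain"
      · have hf : ¬ (pvLabel h == "full_length") := by
          simp only [beq_iff_eq] at hd ⊢; simp [hd]
        rw [show pvStepA (u, d, f) h = (u, d + 1, f) from by simp [pvStepA, he, hd]]
        rw [ih]
        simp only [List.countP_cons, List.length_cons, he, hd, hf, Bool.not_false,
          Bool.true_and, Prod.mk.injEq]
        push_cast
        omega
      · by_cases hf : pvLabel h == "full_length"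
        · rw [show pvStepA (u, d, f) h = (u, d, f + 1) from by simp [pvStepA, he, hd, hf]]
          rw [ih]
          simp only [List.countP_cons, List.length_cons, he, hd, hf, Bool.not_false,
            Bool.true_and, Prod.mk.injEq]
          push_cast
          omega
        · rw [show pvStepA (u, d, f) h = (u + 1, d, f) from by simp [pvStepA, he, hd, hf]]
          rw [ih]
          simp only [List.countP_cons, List.length_cons, he, hd, hf, Bool.not_false,
            Bool.true_and, Prod.mk.injEq]
          push_cast
          omega

-- ===== VERDICT (by name: the statement is the Claim_ definition above) =====
theorem tally_enriched_py_spec : Claim_equal_tally_enriched_py := by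
  intro rows _
  unfold Spec_tally_enriched_py tally_enriched_py tally_enriched_py_alt
  rw [pv_loop]
  simp
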